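-- pv_equiv track=rewrite | github.com/erik-hasse/vans-bot | vans_bot/vans_lcp_faq.py | get_question_changes
-- ===== SOURCE A (Python) =====
-- def get_question_changes(
--     old: dict[str, str], new: dict[str, str]
-- ) -> tuple[set[str], set[str], set[str]]:
--     new_questions = set(new.keys()) - set(old.keys())
--     changed_questions = {
--         q for q in set(new.keys()) & set(old.keys()) if new[q] != old[q]
--     }
--     removed_questions = set(old.keys()) - set(new.keys())
--     return new_questions, changed_questions, removed_questions
-- ===== SOURCE B (Python) =====
-- def get_question_changes(
--     old: dict[str, str], new: dict[str, str]
-- ) -> tuple[set[str], set[str], set[str]]: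
--     # Single merged status index: tentatively tag every new key "new", then sweep old
--     # reclassifying each key in place (drop unchanged, retag shared-but-different as
--     # "changed", append old-only keys as "removed"), and finally distribute the tags.
--     status = {}
--     for q in new:
--         status[q] = "new"
--     for q, v in old.items():
--         if q in status:
--             if new[q] == v:
--                 del status[q]
--             else:
--                 status[q] = "changed"
--         else:
--             status[q] = "removed"
--     new_questions, changed_questions, removed_questions = set(), set(), set()
--     for q, tag in status.items():
--         if tag == "new":
--             new_questions.add(q)
--         elif tag == "changed":
--             changed_questions.add(q)
--         else:
--             removed_questions.add(q)
--     return new_questions, changed_questions, removed_questions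
-- ===== Notes on version B (the rewrite author's own statement) =====
-- stated objective: alternative
-- what changed: Replaces A's set algebra (two set differences, an intersection and a comprehension re-indexing both dicts) by a single merged status index: every new key is tentatively tagged 'new', one sweep over old reclassifies in place (deletes unchanged keys, retags shared-but-different keys 'changed', appends old-only keys 'removed'), and one distribution pass splits the tags into the three sets.
import Mathlib
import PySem

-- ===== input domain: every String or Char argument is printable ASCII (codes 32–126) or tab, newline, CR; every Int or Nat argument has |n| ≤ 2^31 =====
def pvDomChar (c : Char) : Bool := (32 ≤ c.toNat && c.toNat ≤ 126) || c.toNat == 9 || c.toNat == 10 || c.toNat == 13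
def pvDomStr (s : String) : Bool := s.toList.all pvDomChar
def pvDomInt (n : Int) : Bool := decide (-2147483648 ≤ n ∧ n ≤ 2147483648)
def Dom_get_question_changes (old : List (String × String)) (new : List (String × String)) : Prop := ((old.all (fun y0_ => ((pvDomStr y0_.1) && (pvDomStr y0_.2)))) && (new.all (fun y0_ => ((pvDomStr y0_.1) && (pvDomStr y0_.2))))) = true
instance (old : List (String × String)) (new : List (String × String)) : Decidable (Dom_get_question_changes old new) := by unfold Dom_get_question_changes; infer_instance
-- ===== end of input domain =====

-- B replaces A's set algebra by a single merged status index (tag every new key "new", one sweep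
-- over old deleting unchanged keys / retagging "changed" / appending "removed", one distribution
-- pass); same cost, a genuinely different algorithmic organisation (objective: alternative).

-- shared dict primitive on the association-list model: 'd[q]' (first match; keys are unique under Pre_)
def dGet? (d : List (String × String)) (q : String) : Option String := (d.find? (fun p => p.1 == q)).map Prod.snd

-- ===== PORT A =====
def get_question_changes (old : List (String × String)) (new : List (String × String)) : List String × List String × List String :=
  let newKeys := PySem.Set.ofList (new.map Prod.fst)
  let oldKeys := PySem.Set.ofList (old.map Prod.fst)
  let new_questions := PySem.Set.diff newKeys oldKeys
  let changed_questions := PySem.Set.ofList ((PySem.Set.inter newKeys oldKeys).filter (fun q => dGet? new q != dGet? old q))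
  let removed_questions := PySem.Set.diff oldKeys newKeys
  (new_questions, changed_questions, removed_questions)

-- ===== PORT B =====
-- status = {}; for q in new: status[q] = "new"
-- for q, v in old.items(): if q in status: (del status[q] if new[q] == v else status[q] = "changed") else status[q] = "removed"
-- then distribute status.items() into the three sets
def get_question_changes_alt (old : List (String × String)) (new : List (String × String)) : List String × List String × List String :=
  let st0 : PySem.Dict String String := new.foldl (fun d qv => PySem.Dict.insert d qv.1 "new") PySem.Dict.empty
  let st := old.foldl (fun d qv =>
      if PySem.Dict.contains d qv.1 then
        if dGet? new qv.1 == some qv.2 then PySem.Dict.erase d qv.1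
        else PySem.Dict.insert d qv.1 "changed"
      else PySem.Dict.insert d qv.1 "removed") st0
  let out := st.items.foldl (fun (s : List String × List String × List String) qt =>
      if qt.2 == "new" then (PySem.Set.add s.1 qt.1, s.2.1, s.2.2)
      else if qt.2 == "changed" then (s.1, PySem.Set.add s.2.1 qt.1, s.2.2)
      else (s.1, s.2.1, PySem.Set.add s.2.2 qt.1)) (PySem.Set.empty, PySem.Set.empty, PySem.Set.empty)
  out

-- ===== PRECONDITION & SPEC =====
-- Pre_ excludes association lists with duplicate keys: they cannot arise from a Python dict argument,
-- and on them the list model's first-match lookup does not reflect Python's last-wins duplicate collapse.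
def Pre_get_question_changes (old : List (String × String)) (new : List (String × String)) : Prop :=
  (old.map Prod.fst).Nodup ∧ (new.map Prod.fst).Nodup
instance (old : List (String × String)) (new : List (String × String)) : Decidable (Pre_get_question_changes old new) := by unfold Pre_get_question_changes; infer_instance
def pvWitness_get_question_changes : (List (String × String)) × (List (String × String)) :=
  ([("a", "1"), ("b", "2")], [("b", "3"), ("c", "2")])
def Spec_get_question_changes (old : List (String × String)) (new : List (String × String)) (out : List String × List String × List String) : Prop := out = get_question_changes_alt old new
instance (old : List (String × String)) (new : List (String × String)) (out : List String × List String × List String) : Decidable (Spec_get_question_changes old new out) := by unfold Spec_get_question_changes; infer_instance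

-- ===== CLAIM (what is proved, stated in full; the proofs are below) =====
def Claim_equal_get_question_changes : Prop := ∀ (old : List (String × String)) (new : List (String × String)), Dom_get_question_changes old new → Pre_get_question_changes old new → Spec_get_question_changes old new (get_question_changes old new)

-- ===== LEMMAS AND PROOFS =====

-- 'q in d' on the association-list model (proof-side shorthand)
def dMem (d : List (String × String)) (q : String) : Bool := (d.map Prod.fst).contains q

-- the tag B's sweep leaves on a pending "new"-tagged entry after the whole of ol has been processed
def tagF (new ol : List (String × String)) (p : String × String) : Option (String × String) :=
  match dGet? ol p.1 with
  | none => some p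
  | some v => if dGet? new p.1 == some v then none else some (p.1, "changed")

theorem dGet?_cons (a : String × String) (t : List (String × String)) (x : String) :
    dGet? (a :: t) x = if a.1 = x then some a.2 else dGet? t x := by
  by_cases h : a.1 = x <;> simp [dGet?, h]

theorem dGet?_eq_none_iff (l : List (String × String)) (q : String) :
    dGet? l q = none ↔ dMem l q = false := by
  induction l with
  | nil => simp [dGet?, dMem]
  | cons a t ih =>
    rw [dGet?_cons]
    by_cases h : a.1 = q
    · simp [dMem, h]
    · simp only [h, if_false, ih, dMem, List.map_cons, List.contains_cons]
      simp [Ne.symm h]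

theorem dMem_iff (l : List (String × String)) (q : String) :
    dMem l q = true ↔ q ∈ l.map Prod.fst := by
  simp [dMem]

-- keys of the sweep's pending part stay a sublist of the original keys
theorem keys_filterMap_sublist (l : List (String × String)) (f : String × String → Option (String × String))
    (hf : ∀ p r, f p = some r → r.1 = p.1) :
    ((l.filterMap f).map Prod.fst).Sublist (l.map Prod.fst) := by
  induction l with
  | nil => simp
  | cons a t ih =>
    cases hfa : f a with
    | none => simpa [List.filterMap_cons, hfa] using ih.cons a.1
    | some r =>
      simpa [List.filterMap_cons, hfa, hf a r hfa] using ih.cons₂ a.1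

-- a filterMap that sends the key-q entries to none is a filterMap of the q-filtered list
theorem filterMap_drop_key (P : List (String × String)) (f g : String × String → Option (String × String)) (q : String)
    (h1 : ∀ p, p.1 = q → f p = none) (h2 : ∀ p, p.1 ≠ q → f p = g p) :
    P.filterMap f = (P.filter (fun p => !(p.1 == q))).filterMap g := by
  induction P with
  | nil => simp
  | cons a t ih =>
    by_cases h : a.1 = q
    · simp [h1 a h, h, ih]
    · simp only [List.filterMap_cons, List.filter_cons, h2 a h]
      rw [ih]
      have hb : (a.1 == q) = false := by simp [h]
      rw [hb]
      simp only [Bool.not_false, if_true, List.filterMap_cons]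

-- THE SWEEP: B's old-loop, started on a dict ⟨P ++ R⟩ (pending new-keys part P, already-removed part R)
theorem sweep_items (new : List (String × String)) (ol : List (String × String)) :
    ∀ (P R : List (String × String)),
    (ol.map Prod.fst).Nodup →
    ((P.map Prod.fst).Nodup) →
    (∀ p ∈ P, dMem new p.1 = true) →
    (∀ qv ∈ ol, dMem new qv.1 = true → qv.1 ∈ P.map Prod.fst) →
    (∀ qv ∈ ol, ∀ r ∈ R, r.1 ≠ qv.1) →
    (ol.foldl (fun d qv =>
        if PySem.Dict.contains d qv.1 then
          if dGet? new qv.1 == some qv.2 then PySem.Dict.erase d qv.1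
          else PySem.Dict.insert d qv.1 "changed"
        else PySem.Dict.insert d qv.1 "removed") (PySem.Dict.mk (P ++ R))).items
      = P.filterMap (tagF new ol) ++ R ++ (ol.filter (fun qv => !dMem new qv.1)).map (fun qv => (qv.1, "removed")) := by
  induction ol with
  | nil =>
    intro P R _ _ _ _ _
    simp [tagF, dGet?]
  | cons qv t ih =>
    intro P R hol hP hPn h1 h3
    rw [List.map_cons, List.nodup_cons] at hol
    have hRne : ∀ r ∈ R, r.1 ≠ qv.1 := fun r hr => h3 qv (List.mem_cons_self) r hr
    by_cases hq : dMem new qv.1 = true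
    · -- qv.1 is a key of new, hence pending in P
      have hqP : qv.1 ∈ P.map Prod.fst := h1 qv (List.mem_cons_self) hq
      obtain ⟨p0, hp0, hp0k⟩ := List.mem_map.mp hqP
      have hcont : PySem.Dict.contains (PySem.Dict.mk (P ++ R)) qv.1 = true := by
        simp only [PySem.Dict.contains, List.any_eq_true]
        exact ⟨p0, List.mem_append_left _ hp0, by simp [hp0k]⟩
      by_cases he : (dGet? new qv.1 == some qv.2) = true
      · -- unchanged: the entry is deleted
        have hstep :
            (if PySem.Dict.contains (PySem.Dict.mk (P ++ R)) qv.1 then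
              if dGet? new qv.1 == some qv.2 then PySem.Dict.erase (PySem.Dict.mk (P ++ R)) qv.1
              else PySem.Dict.insert (PySem.Dict.mk (P ++ R)) qv.1 "changed"
            else PySem.Dict.insert (PySem.Dict.mk (P ++ R)) qv.1 "removed")
            = PySem.Dict.mk ((P.filter (fun p => !(p.1 == qv.1))) ++ R) := by
          simp only [hcont, he, if_true]
          simp only [PySem.Dict.erase, List.filter_append]
          congr 1
          congr 1
          exact List.filter_eq_self.mpr (fun r hr => by simpa using hRne r hr)
        rw [List.foldl_cons, hstep,
          ih (P.filter (fun p => !(p.1 == qv.1))) R hol.2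
            (hP.sublist (List.Sublist.map Prod.fst List.filter_sublist))
            (fun p hp => hPn p (List.mem_of_mem_filter hp))
            (fun q' hq' hm => by
              obtain ⟨p', hp', hp'k⟩ := List.mem_map.mp (h1 q' (List.mem_cons_of_mem _ hq') hm)
              have hne : p'.1 ≠ qv.1 := by
                rw [hp'k]; intro e; exact hol.1 (e ▸ List.mem_map_of_mem hq')
              exact List.mem_map.mpr ⟨p', List.mem_filter.mpr ⟨hp', by simpa using hne⟩, hp'k⟩)
            (fun q' hq' r hr => h3 q' (List.mem_cons_of_mem _ hq') r hr)]
        rw [filterMap_drop_key P (tagF new (qv :: t)) (tagF new t) qv.1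
          (fun p hpk => by
            have he'' : dGet? new qv.1 = some qv.2 := eq_of_beq he
            simp [tagF, dGet?_cons, hpk, he''])
          (fun p hpk => by simp [tagF, dGet?_cons, Ne.symm hpk])]
        have : dMem new qv.1 = true := hq
        simp [this]
      · -- changed: the entry is overwritten in place
        have hstep :
            (if PySem.Dict.contains (PySem.Dict.mk (P ++ R)) qv.1 then
              if dGet? new qv.1 == some qv.2 then PySem.Dict.erase (PySem.Dict.mk (P ++ R)) qv.1
              else PySem.Dict.insert (PySem.Dict.mk (P ++ R)) qv.1 "changed"
            else PySem.Dict.insert (PySem.Dict.mk (P ++ R)) qv.1 "removed")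
            = PySem.Dict.mk ((P.map (fun p => if p.1 == qv.1 then (qv.1, "changed") else p)) ++ R) := by
          simp only [hcont, he, if_true, Bool.false_eq_true, if_false]
          simp only [PySem.Dict.insert, hcont, if_true]
          simp only [List.map_append]
          congr 1
          congr 1
          exact (List.map_congr_left (fun r hr => by simp [hRne r hr])).trans (List.map_id R)
        have hkeys : (P.map (fun p => if p.1 == qv.1 then (qv.1, "changed") else p)).map Prod.fst
            = P.map Prod.fst := by
          rw [List.map_map]
          exact List.map_congr_left (fun p _ => by
            by_cases hpk : p.1 = qv.1 <;> simp [hpk])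
        rw [List.foldl_cons, hstep,
          ih (P.map (fun p => if p.1 == qv.1 then (qv.1, "changed") else p)) R hol.2
            (by rw [hkeys]; exact hP)
            (fun p hp => by
              obtain ⟨p', hp', rfl⟩ := List.mem_map.mp hp
              by_cases hpk : p'.1 = qv.1
              · simp only [hpk, beq_self_eq_true, if_true]
                exact hpk ▸ hPn p' hp'
              · simp only [beq_eq_false_iff_ne.mpr hpk, Bool.false_eq_true, if_false]
                exact hPn p' hp'
            )
            (fun q' hq' hm => by rw [hkeys]; exact h1 q' (List.mem_cons_of_mem _ hq') hm)
            (fun q' hq' r hr => h3 q' (List.mem_cons_of_mem _ hq') r hr)]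
        have hq2 : dMem new qv.1 = true := hq
        simp [hq2]
        exact List.filterMap_congr (fun p _ => by
          by_cases hpk : p.1 = qv.1
          · have hnt : dGet? t qv.1 = none :=
              (dGet?_eq_none_iff t qv.1).mpr
                (Bool.eq_false_iff.mpr (fun hmm => hol.1 ((dMem_iff t qv.1).mp hmm)))
            simp [hpk, tagF, dGet?_cons, he, hnt]
          · simp [hpk, tagF, dGet?_cons, Ne.symm hpk])
    · -- qv.1 is old-only: appended as "removed"
      have hcont : PySem.Dict.contains (PySem.Dict.mk (P ++ R)) qv.1 = false := by
        simp only [PySem.Dict.contains, List.any_eq_false]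
        intro p hp
        rcases List.mem_append.mp hp with h | h
        · intro hbe
          exact hq ((eq_of_beq hbe) ▸ hPn p h)
        · simpa using hRne p h
      have hstep :
          (if PySem.Dict.contains (PySem.Dict.mk (P ++ R)) qv.1 then
            if dGet? new qv.1 == some qv.2 then PySem.Dict.erase (PySem.Dict.mk (P ++ R)) qv.1
            else PySem.Dict.insert (PySem.Dict.mk (P ++ R)) qv.1 "changed"
          else PySem.Dict.insert (PySem.Dict.mk (P ++ R)) qv.1 "removed")
          = PySem.Dict.mk (P ++ (R ++ [(qv.1, "removed")])) := by
        simp only [hcont, Bool.false_eq_true, if_false]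
        simp only [PySem.Dict.insert, hcont, Bool.false_eq_true, if_false]
        simp [List.append_assoc]
      rw [List.foldl_cons, hstep,
        ih P (R ++ [(qv.1, "removed")]) hol.2 hP hPn
          (fun q' hq' hm => h1 q' (List.mem_cons_of_mem _ hq') hm)
          (fun q' hq' r hr => by
            rcases List.mem_append.mp hr with h | h
            · exact h3 q' (List.mem_cons_of_mem _ hq') r h
            · rw [List.mem_singleton.mp h]
              intro e
              exact hol.1 (e ▸ List.mem_map_of_mem hq'))]
      rw [List.filterMap_congr (l := P) (g := tagF new (qv :: t))
        (fun p hp => by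
          have hpk : p.1 ≠ qv.1 := by
            intro e
            exact hq (e ▸ hPn p hp)
          simp [tagF, dGet?_cons, Ne.symm hpk])]
      simp [hq, List.append_assoc]

-- the distribution pass over status.items() splits the list by tag, appending keys to three sets
theorem extract_triple (L : List (String × String)) :
    ∀ (a b c : List String),
    (∀ p ∈ L, p.1 ∉ a) → (∀ p ∈ L, p.1 ∉ b) → (∀ p ∈ L, p.1 ∉ c) → ((L.map Prod.fst).Nodup) →
    L.foldl (fun (s : List String × List String × List String) qt =>
        if qt.2 == "new" then (PySem.Set.add s.1 qt.1, s.2.1, s.2.2)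
        else if qt.2 == "changed" then (s.1, PySem.Set.add s.2.1 qt.1, s.2.2)
        else (s.1, s.2.1, PySem.Set.add s.2.2 qt.1)) (a, b, c)
    = (a ++ (L.filter (fun p => p.2 == "new")).map Prod.fst,
       b ++ (L.filter (fun p => !(p.2 == "new") && (p.2 == "changed"))).map Prod.fst,
       c ++ (L.filter (fun p => !(p.2 == "new") && !(p.2 == "changed"))).map Prod.fst) := by
  induction L with
  | nil => intro a b c _ _ _ _; simp
  | cons p t ih =>
    intro a b c ha hb hc hnd
    rw [List.map_cons, List.nodup_cons] at hnd
    have hfr : ∀ (x : String × String), x ∈ t → ∀ (l : List String),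
        (∀ y ∈ p :: t, y.1 ∉ l) → x.1 ∉ l ++ [p.1] := by
      intro x hx l hl hmem
      rcases List.mem_append.mp hmem with h | h
      · exact hl x (List.mem_cons_of_mem _ hx) h
      · exact hnd.1 ((List.mem_singleton.mp h) ▸ List.mem_map_of_mem hx)
    by_cases h1 : (p.2 == "new") = true
    · rw [List.foldl_cons]
      simp only [h1, if_true]
      rw [PySem.Set.add_of_not_mem (ha p List.mem_cons_self),
        ih (a ++ [p.1]) b c (fun x hx => hfr x hx a ha)
          (fun x hx => hb x (List.mem_cons_of_mem _ hx))
          (fun x hx => hc x (List.mem_cons_of_mem _ hx)) hnd.2]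
      simp [h1]
    · by_cases h2 : (p.2 == "changed") = true
      · rw [List.foldl_cons]
        simp only [h1, h2, Bool.false_eq_true, if_false, if_true]
        rw [PySem.Set.add_of_not_mem (hb p List.mem_cons_self),
          ih a (b ++ [p.1]) c (fun x hx => ha x (List.mem_cons_of_mem _ hx))
            (fun x hx => hfr x hx b hb)
            (fun x hx => hc x (List.mem_cons_of_mem _ hx)) hnd.2]
        simp [h1, h2]
      · rw [List.foldl_cons]
        simp only [h1, h2, Bool.false_eq_true, if_false]
        rw [PySem.Set.add_of_not_mem (hc p List.mem_cons_self),
          ih a b (c ++ [p.1]) (fun x hx => ha x (List.mem_cons_of_mem _ hx))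
            (fun x hx => hb x (List.mem_cons_of_mem _ hx))
            (fun x hx => hfr x hx c hc) hnd.2]
        simp [h1, h2]

theorem dMem_true_of_dGet?_some (l : List (String × String)) (q : String) (v : String)
    (h : dGet? l q = some v) : dMem l q = true := by
  cases hDm : dMem l q with
  | true => rfl
  | false => rw [(dGet?_eq_none_iff l q).mpr hDm] at h; cases h

theorem contains_ofList_eq (xs : List String) (q : String) :
    (PySem.Set.ofList xs).contains q = xs.contains q := by
  rw [Bool.eq_iff_iff]
  simp [PySem.Set.mem_ofList]

theorem map_fst_filter (l : List (String × String)) (p : String → Bool) :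
    (l.filter (fun qv => p qv.1)).map Prod.fst = (l.map Prod.fst).filter p := by
  simp [List.filter_map]
  rfl

-- the pending part of the final status dict, filtered by tag
theorem pfm_filter_new (new old : List (String × String)) (l : List (String × String)) :
    (((l.map (fun qv => (qv.1, "new"))).filterMap (tagF new old)).filter (fun p => p.2 == "new")).map Prod.fst
      = (l.map Prod.fst).filter (fun q => !dMem old q) := by
  induction l with
  | nil => simp
  | cons qv t ih =>
    simp only [List.filterMap_map, Function.comp_def] at ih
    simp only [List.map_cons, List.filterMap_cons]
    cases hd : dGet? old qv.1 with
    | none =>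
      have hm : dMem old qv.1 = false := (dGet?_eq_none_iff old qv.1).mp hd
      have ht : tagF new old (qv.1, "new") = some (qv.1, "new") := by simp [tagF, hd]
      simp [ht, hm, ih]
    | some v =>
      have hm : dMem old qv.1 = true := dMem_true_of_dGet?_some old qv.1 v hd
      by_cases he : (dGet? new qv.1 == some v) = true
      · have ht : tagF new old (qv.1, "new") = none := by
          simp only [tagF, hd]; rw [if_pos he]
        simp [ht, hm, ih]
      · have ht : tagF new old (qv.1, "new") = some (qv.1, "changed") := by
          simp only [tagF, hd]; rw [if_neg he]
        simp [ht, hm, ih]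

theorem pfm_filter_changed (new old : List (String × String)) (l : List (String × String)) :
    (((l.map (fun qv => (qv.1, "new"))).filterMap (tagF new old)).filter (fun p => !(p.2 == "new") && (p.2 == "changed"))).map Prod.fst
      = (l.map Prod.fst).filter (fun q => dMem old q && (dGet? new q != dGet? old q)) := by
  induction l with
  | nil => simp
  | cons qv t ih =>
    simp only [List.filterMap_map, Function.comp_def] at ih
    simp only [List.map_cons, List.filterMap_cons]
    cases hd : dGet? old qv.1 with
    | none =>
      have hm : dMem old qv.1 = false := (dGet?_eq_none_iff old qv.1).mp hd
      have ht : tagF new old (qv.1, "new") = some (qv.1, "new") := by simp [tagF, hd]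
      simp [ht, hm, ih]
    | some v =>
      have hm : dMem old qv.1 = true := dMem_true_of_dGet?_some old qv.1 v hd
      by_cases he : (dGet? new qv.1 == some v) = true
      · have ht : tagF new old (qv.1, "new") = none := by
          simp only [tagF, hd]; rw [if_pos he]
        simp [ht, hm, hd, eq_of_beq he, ih]
      · have ht : tagF new old (qv.1, "new") = some (qv.1, "changed") := by
          simp only [tagF, hd]; rw [if_neg he]
        simp [ht, hm, hd, ih]
        rw [List.filter_cons_of_pos (by simp [hm, hd]; simpa using he)]

theorem pfm_filter_rem (new old : List (String × String)) (l : List (String × String)) :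
    ((l.map (fun qv => (qv.1, "new"))).filterMap (tagF new old)).filter (fun p => !(p.2 == "new") && !(p.2 == "changed")) = [] := by
  induction l with
  | nil => simp
  | cons qv t ih =>
    simp only [List.filterMap_map, Function.comp_def] at ih
    simp only [List.map_cons, List.filterMap_cons]
    cases hd : dGet? old qv.1 with
    | none =>
      have ht : tagF new old (qv.1, "new") = some (qv.1, "new") := by simp [tagF, hd]
      simp [ht, ih]
    | some v =>
      by_cases he : (dGet? new qv.1 == some v) = true
      · have ht : tagF new old (qv.1, "new") = none := by
          simp only [tagF, hd]; rw [if_pos he]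
        simp [ht, ih]
      · have ht : tagF new old (qv.1, "new") = some (qv.1, "changed") := by
          simp only [tagF, hd]; rw [if_neg he]
        simp [ht, ih]

theorem get_question_changes_eq (old new : List (String × String))
    (ho : (old.map Prod.fst).Nodup) (hn : (new.map Prod.fst).Nodup) :
    get_question_changes old new = get_question_changes_alt old new := by
  have hPkeys : (new.map (fun qv => (qv.1, "new"))).map Prod.fst = new.map Prod.fst := by
    rw [List.map_map]; rfl
  -- tagF never changes a key
  have hfm : ∀ (p r : String × String), tagF new old p = some r → r.1 = p.1 := by
    intro p r h
    cases hd : dGet? old p.1 with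
    | none => simp only [tagF, hd] at h; cases h; rfl
    | some v =>
      simp only [tagF, hd] at h
      by_cases he : (dGet? new p.1 == some v) = true
      · rw [if_pos he] at h; cases h
      · rw [if_neg he] at h; cases h; rfl
  -- the first loop builds the all-"new" status dict
  have hst0 : (new.foldl (fun d qv => PySem.Dict.insert d qv.1 "new") PySem.Dict.empty)
      = PySem.Dict.mk (new.map (fun qv => (qv.1, "new")) ++ []) := by
    apply PySem.Dict.ext
    rw [List.append_nil]
    simpa using PySem.Dict.items_foldl_insert_fresh new (fun qv => qv.1) (fun _ => "new")
      PySem.Dict.empty (fun a _ => PySem.Dict.contains_empty _) hn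
  -- the sweep's final items
  have hsweep := sweep_items new old (new.map (fun qv => (qv.1, "new"))) [] ho
    (hPkeys ▸ hn)
    (fun p hp => by
      obtain ⟨qv, hqv, rfl⟩ := List.mem_map.mp hp
      exact (dMem_iff new qv.1).mpr (List.mem_map_of_mem hqv))
    (fun q' _ hm => by rw [hPkeys]; exact (dMem_iff new q'.1).mp hm)
    (fun q' _ r hr => absurd hr (List.not_mem_nil))
  set Pfm := (new.map (fun qv => (qv.1, "new"))).filterMap (tagF new old) with hPfm
  set Rem := (old.filter (fun qv => !dMem new qv.1)).map (fun qv => (qv.1, "removed")) with hRem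
  -- keys of the final status items are distinct
  have hkPfm : (Pfm.map Prod.fst).Sublist (new.map Prod.fst) :=
    hPkeys ▸ keys_filterMap_sublist (new.map (fun qv => (qv.1, "new"))) (tagF new old) hfm
  have hkRem : Rem.map Prod.fst = (old.map Prod.fst).filter (fun q => !dMem new q) := by
    rw [hRem, List.map_map]
    exact map_fst_filter old (fun q => !dMem new q)
  have hndL : (((Pfm ++ Rem).map Prod.fst)).Nodup := by
    rw [List.map_append]
    refine List.Nodup.append (hn.sublist hkPfm) (by rw [hkRem]; exact ho.filter _) ?_
    intro x hx1 hx2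
    rw [hkRem, List.mem_filter] at hx2
    have : dMem new x = true := (dMem_iff new x).mpr (hkPfm.subset hx1)
    rw [this] at hx2
    simp at hx2
  -- every entry of Rem is tagged "removed"
  have hRemTag : ∀ p ∈ Rem, p.2 = "removed" := by
    intro p hp
    obtain ⟨qv, _, rfl⟩ := List.mem_map.mp hp
    rfl
  -- assemble
  simp only [get_question_changes, get_question_changes_alt]
  rw [hst0, hsweep, List.append_nil]
  rw [extract_triple (Pfm ++ Rem) PySem.Set.empty PySem.Set.empty PySem.Set.empty
    (fun p _ => List.not_mem_nil) (fun p _ => List.not_mem_nil) (fun p _ => List.not_mem_nil) hndL]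
  have hA1 : PySem.Set.diff (PySem.Set.ofList (new.map Prod.fst)) (PySem.Set.ofList (old.map Prod.fst))
      = (new.map Prod.fst).filter (fun q => !dMem old q) := by
    rw [PySem.Set.diff, PySem.Set.ofList_eq_self_of_nodup _ hn]
    exact List.filter_congr (fun q _ => by rw [contains_ofList_eq]; rfl)
  have hA3 : PySem.Set.diff (PySem.Set.ofList (old.map Prod.fst)) (PySem.Set.ofList (new.map Prod.fst))
      = (old.map Prod.fst).filter (fun q => !dMem new q) := by
    rw [PySem.Set.diff, PySem.Set.ofList_eq_self_of_nodup _ ho]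
    exact List.filter_congr (fun q _ => by rw [contains_ofList_eq]; rfl)
  have hA2 : PySem.Set.ofList ((PySem.Set.inter (PySem.Set.ofList (new.map Prod.fst)) (PySem.Set.ofList (old.map Prod.fst))).filter (fun q => dGet? new q != dGet? old q))
      = (new.map Prod.fst).filter (fun q => dMem old q && (dGet? new q != dGet? old q)) := by
    rw [PySem.Set.inter, PySem.Set.ofList_eq_self_of_nodup _ hn, List.filter_filter]
    rw [PySem.Set.ofList_eq_self_of_nodup _ (hn.filter _)]
    refine List.filter_congr (fun q _ => ?_)
    rw [Bool.and_comm]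
    congr 1
    rw [contains_ofList_eq]; rfl
  have hB1 : ((Pfm ++ Rem).filter (fun p => p.2 == "new")).map Prod.fst
      = (new.map Prod.fst).filter (fun q => !dMem old q) := by
    have hR : Rem.filter (fun p => p.2 == "new") = [] :=
      List.filter_eq_nil_iff.mpr (fun p hp => by simp [hRemTag p hp])
    rw [List.filter_append, hR, List.append_nil]
    exact pfm_filter_new new old new
  have hB2 : ((Pfm ++ Rem).filter (fun p => !(p.2 == "new") && (p.2 == "changed"))).map Prod.fst
      = (new.map Prod.fst).filter (fun q => dMem old q && (dGet? new q != dGet? old q)) := by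
    have hR : Rem.filter (fun p => !(p.2 == "new") && (p.2 == "changed")) = [] :=
      List.filter_eq_nil_iff.mpr (fun p hp => by simp [hRemTag p hp])
    rw [List.filter_append, hR, List.append_nil]
    exact pfm_filter_changed new old new
  have hB3 : ((Pfm ++ Rem).filter (fun p => !(p.2 == "new") && !(p.2 == "changed"))).map Prod.fst
      = (old.map Prod.fst).filter (fun q => !dMem new q) := by
    have hR : Rem.filter (fun p => !(p.2 == "new") && !(p.2 == "changed")) = Rem :=
      List.filter_eq_self.mpr (fun p hp => by simp [hRemTag p hp])
    rw [List.filter_append, pfm_filter_rem new old new, List.nil_append, hR]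
    exact hkRem
  simp only [PySem.Set.empty, List.nil_append]
  rw [hA1, hA2, hA3, hB1, hB2, hB3]

-- ===== VERDICT (by name: the statement is the Claim_ definition above) =====
theorem get_question_changes_spec : Claim_equal_get_question_changes := by
  intro old new _ hpre
  exact (get_question_changes_eq old new hpre.1 hpre.2).symm ▸ rfl
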